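-- pv_equiv track=rewrite | github.com/martin3836/DSA_A1 | a1_partd.py | scan_for_dual_signs
-- ===== SOURCE A (Python) =====
-- def scan_for_dual_signs(grid):
--     has_positive = False
--     has_negative = False
--     for line in grid:
--         for item in line:
--             if item > 0:
--                 has_positive = True
--             elif item < 0:
--                 has_negative = True
--             if has_positive and has_negative:
--                 return True
--     return False
-- ===== SOURCE B (Python) =====
-- def scan_for_dual_signs(grid):
--     flat = [item for line in grid for item in line]
--     return any(x > 0 for x in flat) and any(x < 0 for x in flat)
-- ===== Notes on version B (the rewrite author's own statement) =====
-- stated objective: simpler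
-- what changed: Replaces the interleaved two-flag early-exit nested loop with flatten-once then two short-circuiting any() scans over the flat list.
import Mathlib
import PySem

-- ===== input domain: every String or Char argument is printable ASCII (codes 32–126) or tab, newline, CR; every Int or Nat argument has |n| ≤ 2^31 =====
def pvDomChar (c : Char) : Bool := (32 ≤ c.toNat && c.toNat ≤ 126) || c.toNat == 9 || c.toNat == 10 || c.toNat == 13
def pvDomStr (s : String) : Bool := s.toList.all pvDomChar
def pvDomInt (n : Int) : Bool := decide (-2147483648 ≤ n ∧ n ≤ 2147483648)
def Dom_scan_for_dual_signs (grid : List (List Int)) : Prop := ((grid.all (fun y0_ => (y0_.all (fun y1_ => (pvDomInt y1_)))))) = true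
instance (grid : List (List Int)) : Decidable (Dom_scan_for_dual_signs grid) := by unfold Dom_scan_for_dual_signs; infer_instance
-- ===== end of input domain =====

-- B flattens the grid once, then does two short-circuiting scans (positive, then negative); simpler decomposition than A's interleaved two-flag loop.

-- ===== PORT A =====
-- inner loop over one line, carrying the two flags; returns either the final flags or an early `true`
def scanLineA (line : List Int) (hp hn : Bool) : Bool ⊕ (Bool × Bool) :=
  match line with
  | [] => Sum.inr (hp, hn)
  | item :: rest =>
      let hp' := if item > 0 then true else hp
      let hn' := if item > 0 then hn else if item < 0 then true else hn
      if hp' && hn' then Sum.inl true else scanLineA rest hp' hn'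

def scanGridA (grid : List (List Int)) (hp hn : Bool) : Bool :=
  match grid with
  | [] => false
  | line :: rest =>
      match scanLineA line hp hn with
      | Sum.inl b => b
      | Sum.inr (hp', hn') => scanGridA rest hp' hn'

def scan_for_dual_signs (grid : List (List Int)) : Bool :=
  scanGridA grid false false

-- ===== PORT B =====
def scan_for_dual_signs_alt (grid : List (List Int)) : Bool :=
  let flat := grid.flatMap (fun line => line)
  (flat.any (fun x => x > 0)) && (flat.any (fun x => x < 0))

-- ===== PRECONDITION & SPEC =====
def Spec_scan_for_dual_signs (grid : List (List Int)) (out : Bool) : Prop := out = scan_for_dual_signs_alt grid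
instance (grid : List (List Int)) (out : Bool) : Decidable (Spec_scan_for_dual_signs grid out) := by unfold Spec_scan_for_dual_signs; infer_instance

-- ===== CLAIM (what is proved, stated in full; the proofs are below) =====
def Claim_equal_scan_for_dual_signs : Prop := ∀ (grid : List (List Int)), Dom_scan_for_dual_signs grid → Spec_scan_for_dual_signs grid (scan_for_dual_signs grid)

-- ===== LEMMAS AND PROOFS =====

theorem scanLineA_char (line : List Int) (hp hn : Bool) (h : ¬(hp = true ∧ hn = true)) :
    scanLineA line hp hn =
      (if (hp || line.any (fun x => x > 0)) && (hn || line.any (fun x => x < 0)) then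
        Sum.inl true
      else
        Sum.inr (hp || line.any (fun x => x > 0), hn || line.any (fun x => x < 0))) := by
  induction line generalizing hp hn with
  | nil =>
    rcases hp <;> rcases hn <;> simp_all [scanLineA]
  | cons a rest ih =>
    simp only [scanLineA, List.any_cons]
    by_cases ha : a > 0
    · have ha' : ¬ a < 0 := by omega
      rcases hn with _ | _
      · simp only [ha, ha', if_true, if_false, decide_true]
        rw [ih true false (by simp)]
        simp
      · simp [ha, ha']
    · by_cases hb : a < 0
      · rcases hp with _ | _
        · simp only [ha, hb, if_false, if_true]
          rw [ih false true (by simp)]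
          simp
        · simp [ha, hb]
      · simp only [ha, hb, if_false]
        rw [ih hp hn h]
        simp
        intro h1 h2
        exact absurd ⟨h1, h2⟩ h

theorem scanGridA_char (grid : List (List Int)) (hp hn : Bool) (h : ¬(hp = true ∧ hn = true)) :
    scanGridA grid hp hn =
      ((hp || grid.any (fun l => l.any (fun x => x > 0)))
        && (hn || grid.any (fun l => l.any (fun x => x < 0)))) := by
  induction grid generalizing hp hn with
  | nil =>
    rcases hp <;> rcases hn <;> simp_all [scanGridA]
  | cons line rest ih =>
    rw [scanGridA, scanLineA_char line hp hn h]
    cases hc : ((hp || line.any (fun x => x > 0)) && (hn || line.any (fun x => x < 0)))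
    · have hc' : ¬((hp || line.any (fun x => x > 0)) = true ∧ (hn || line.any (fun x => x < 0)) = true) := by
        intro ⟨h1, h2⟩; simp [h1, h2] at hc
      simp only [Bool.false_eq_true, if_false]
      rw [ih _ _ hc']
      simp [List.any_cons, Bool.or_assoc]
    · have hc' := hc
      simp only [Bool.and_eq_true, Bool.or_eq_true] at hc'
      simp only [if_true, List.any_cons]
      rcases hc' with ⟨h1, h2⟩
      rcases h1 with h1 | h1 <;> rcases h2 with h2 | h2 <;> simp [h1, h2]

-- ===== VERDICT (by name: the statement is the Claim_ definition above) =====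
theorem scan_for_dual_signs_spec : Claim_equal_scan_for_dual_signs := by
  intro grid _
  unfold Spec_scan_for_dual_signs scan_for_dual_signs scan_for_dual_signs_alt
  rw [scanGridA_char _ _ _ (by simp)]
  simp
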